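-- pv_equiv track=rewrite | github.com/Creamery/OOTO-Miner-V5 | _Widget_support.py | createFilter
-- ===== SOURCE A (Python) =====
-- from collections import OrderedDict
-- import itertools
--
-- def createFilter(featureSet, featureGroupMap):
--
--     filters = []
--     groupSet = []
--
--     # initialize groupSet array
--     for feature in featureSet:
--         groupSet.append(featureGroupMap[feature])  # an array of groups, ex: [ [a, b, c], [a, b] ]
--
--     groupSet = list(itertools.product(*groupSet))  # store all the combinations of a list of lists via itertools
--
--     keys = featureSet
--     for group in groupSet:
--         filter = OrderedDict(zip(keys, group))
--         filters.append(filter)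
--
--     return filters
-- ===== SOURCE B (Python) =====
-- from collections import OrderedDict
--
-- def createFilter(featureSet, featureGroupMap):
--     # iterative accumulation: extend partial OrderedDicts feature by feature
--     combos = [OrderedDict()]
--     for feature in featureSet:
--         group = featureGroupMap[feature]
--         nextCombos = []
--         for combo in combos:
--             for value in group:
--                 extended = combo.copy()
--                 extended[feature] = value
--                 nextCombos.append(extended)
--         combos = nextCombos
--     return combos
-- ===== Notes on version B (the rewrite author's own statement) =====
-- stated objective: alternative
-- what changed: Replaces itertools.product over pre-collected groups plus a zip-into-OrderedDict pass with a single iterative accumulation: partial OrderedDicts are extended feature by feature, so no tuple product and no zip step exist.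
import Mathlib
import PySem

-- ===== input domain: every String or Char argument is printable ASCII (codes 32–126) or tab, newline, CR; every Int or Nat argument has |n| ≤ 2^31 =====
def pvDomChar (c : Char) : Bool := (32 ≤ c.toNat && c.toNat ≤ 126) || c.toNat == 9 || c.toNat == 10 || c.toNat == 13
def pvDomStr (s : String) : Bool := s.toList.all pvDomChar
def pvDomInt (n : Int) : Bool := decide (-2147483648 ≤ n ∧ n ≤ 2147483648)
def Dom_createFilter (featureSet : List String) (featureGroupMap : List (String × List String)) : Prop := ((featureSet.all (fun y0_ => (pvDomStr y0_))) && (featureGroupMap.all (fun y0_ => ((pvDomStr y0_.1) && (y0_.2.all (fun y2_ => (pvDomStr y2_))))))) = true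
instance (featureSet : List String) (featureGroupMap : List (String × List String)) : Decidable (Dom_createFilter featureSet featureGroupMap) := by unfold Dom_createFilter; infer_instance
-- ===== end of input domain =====

-- B replaces itertools.product + zip-into-OrderedDict with one iterative accumulation of partial
-- OrderedDicts (objective: alternative decomposition, same cost). Return-value equivalence only.

-- ===== PORT A =====

-- itertools.product(*groupSet), transcribed as its standard recursive specification
-- (first iterable varies slowest, product of no iterables is [()])
def pyProduct (groups : List (List String)) : List (List String) :=
  match groups with
  | [] => [[]]
  | g :: gs => g.flatMap (fun x => (pyProduct gs).map (fun rest => x :: rest))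

def createFilter (featureSet : List String) (featureGroupMap : List (String × List String)) : List (List (String × String)) :=
  let d := PySem.Dict.ofList featureGroupMap
  -- for feature in featureSet: groupSet.append(featureGroupMap[feature])  (KeyError excluded by Pre_)
  let groupSet := featureSet.foldl (fun acc feature => acc ++ [d.getD feature []]) []
  let groupSet := pyProduct groupSet
  -- for group in groupSet: filters.append(OrderedDict(zip(keys, group)))
  groupSet.foldl (fun filters group => filters ++ [(PySem.Dict.ofList (featureSet.zip group)).items]) []

-- ===== PORT B =====
def createFilter_alt (featureSet : List String) (featureGroupMap : List (String × List String)) : List (List (String × String)) :=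
  let dm := PySem.Dict.ofList featureGroupMap
  let combos : List (PySem.Dict String String) :=
    featureSet.foldl (fun combos feature =>
      let group := dm.getD feature []
      combos.foldl (fun nextCombos combo =>
        group.foldl (fun nextCombos value =>
          nextCombos ++ [combo.insert feature value]) nextCombos) [])
      [PySem.Dict.empty]
  combos.map (fun c => c.items)

-- ===== PRECONDITION & SPEC =====
-- Pre_ excludes exactly the inputs where featureGroupMap[feature] raises KeyError (both A and B raise there)
def Pre_createFilter (featureSet : List String) (featureGroupMap : List (String × List String)) : Prop :=
  ∀ f ∈ featureSet, f ∈ featureGroupMap.map Prod.fst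

instance (featureSet : List String) (featureGroupMap : List (String × List String)) : Decidable (Pre_createFilter featureSet featureGroupMap) := by unfold Pre_createFilter; infer_instance

def pvWitness_createFilter : List String × (List (String × List String)) := (["a", "b"], [("a", ["x", "y"]), ("b", ["z"])])

def Spec_createFilter (featureSet : List String) (featureGroupMap : List (String × List String)) (out : List (List (String × String))) : Prop := out = createFilter_alt featureSet featureGroupMap
instance (featureSet : List String) (featureGroupMap : List (String × List String)) (out : List (List (String × String))) : Decidable (Spec_createFilter featureSet featureGroupMap out) := by unfold Spec_createFilter; infer_instance

-- ===== CLAIM (what is proved, stated in full; the proofs are below) =====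
def Claim_equal_createFilter : Prop := ∀ (featureSet : List String) (featureGroupMap : List (String × List String)), Dom_createFilter featureSet featureGroupMap → Pre_createFilter featureSet featureGroupMap → Spec_createFilter featureSet featureGroupMap (createFilter featureSet featureGroupMap)

-- ===== LEMMAS AND PROOFS =====

-- core invariant of B's expansion (with the innermost append-loop already written as a map):
-- from a list of seed dicts, the loop produces, for each seed, every product combination folded
-- into it (seed outer, product inner)
theorem expand_eq (fs : List String) (dm : PySem.Dict String (List String))
    (seeds : List (PySem.Dict String String)) :
    fs.foldl (fun combos feature =>
        combos.foldl (fun nextCombos combo =>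
          nextCombos ++ List.map (combo.insert feature) (dm.getD feature [])) []) seeds
      = seeds.flatMap (fun d => (pyProduct (fs.map (fun f => dm.getD f []))).map
          (fun g => (fs.zip g).foldl (fun d p => d.insert p.1 p.2) d)) := by
  induction fs generalizing seeds with
  | nil => simp [pyProduct]
  | cons f fs ih =>
    simp only [List.foldl_cons, List.map_cons, pyProduct]
    rw [PySem.List.foldl_append_eq_flatMap, List.nil_append, ih]
    rw [List.flatMap_assoc]
    refine List.flatMap_congr (fun d _ => ?_)
    simp [List.map_flatMap, List.flatMap_map, List.map_map, Function.comp_def]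

-- OrderedDict(zip(keys, group)) is a fold of inserts from the empty dict
theorem ofList_zip_eq_foldl (ps : List (String × String)) :
    PySem.Dict.ofList ps = ps.foldl (fun d p => d.insert p.1 p.2) PySem.Dict.empty := by
  simp [PySem.Dict.ofList, PySem.Dict.update]

-- ===== VERDICT (by name: the statement is the Claim_ definition above) =====
theorem createFilter_spec : Claim_equal_createFilter := by
  intro featureSet featureGroupMap _ _
  unfold Spec_createFilter createFilter createFilter_alt
  simp only [PySem.List.foldl_append_singleton_eq_map, List.nil_append]
  rw [expand_eq]
  simp [ofList_zip_eq_foldl, List.map_map, Function.comp_def]
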